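-- pv_equiv track=rewrite | github.com/Mikail-7D6/Number_systems_calculator | Калькулятор СС (Tkinter).py | from_all_others
-- ===== SOURCE A (Python) =====
-- def verification(num, side):
--     lis_num = [10, 11, 12, 13, 14, 15]
--     lis_str = ['A', 'B', 'C', 'D', 'E', 'F']
--     if side == 'in':
--         if int(num) % 16 in lis_num:
--             und = lis_num.index(int(num) % 16)
--             number = lis_str[und]
--         else:
--             number = str(int(num) % 16)
--     else:
--         if num in lis_str:
--             und = lis_str.index(num)
--             number = lis_num[und]
--         else:
--             number = num
--     return number
--
-- def from_all_others(system, num):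
--     number = 0
--     if system == '2' or system == '8':
--         num = list(num)[::-1]
--         for i in range(len(num)):
--             number += int(num[i]) * (int(system) ** i)
--     elif system == '16':
--         side = 'from'
--         num = list(num)[::-1]
--         for i in range(len(num)):
--             num[i] = verification(num[i], side)
--             number += int(num[i]) * (16 ** i)
--     return number
-- ===== SOURCE B (Python) =====
-- _HEX = {'A': 10, 'B': 11, 'C': 12, 'D': 13, 'E': 14, 'F': 15}
--
-- def from_all_others(system, num):
--     if system == '2' or system == '8':
--         base = int(system)
--         number = 0
--         for ch in num:
--             number = number * base + int(ch)
--         return number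
--     if system == '16':
--         number = 0
--         for ch in num:
--             number = number * 16 + (_HEX[ch] if ch in _HEX else int(ch))
--         return number
--     return 0
-- ===== Notes on version B (the rewrite author's own statement) =====
-- stated objective: simpler
-- what changed: Replaces the reverse-the-string-and-sum int(digit)*base**i loop (with a power recomputed at every position and a helper mapping hex letters through parallel lists) by a single forward Horner pass number = number*base + digit, with hex letters resolved by one dict lookup.
import Mathlib
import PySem

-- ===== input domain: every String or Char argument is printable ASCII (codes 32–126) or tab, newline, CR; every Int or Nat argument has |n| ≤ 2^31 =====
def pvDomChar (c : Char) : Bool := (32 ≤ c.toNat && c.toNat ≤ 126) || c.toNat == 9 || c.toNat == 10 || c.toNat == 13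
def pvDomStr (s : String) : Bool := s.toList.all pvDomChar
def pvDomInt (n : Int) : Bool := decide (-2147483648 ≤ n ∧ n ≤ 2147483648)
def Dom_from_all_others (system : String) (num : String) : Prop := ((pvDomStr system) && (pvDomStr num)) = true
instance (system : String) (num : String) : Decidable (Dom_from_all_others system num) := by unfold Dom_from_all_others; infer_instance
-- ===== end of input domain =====

-- B converts by a single forward Horner pass (number = number*base + digit, hex letters via a dict)
-- instead of A's reversed-index sum of int(digit)*base**i with list-pair hex lookup; objective: simpler.


-- ===== PORT A =====
-- verification: the 'in' branch parses int(num) with PySem.Int.ofStr? (getD 0: never reached by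
-- from_all_others, which always passes side = "from"); Python's mixed int/str return is rendered
-- as String via PySem.Int.toStr, exact because the caller immediately applies int(...) to it.
def verification (num : String) (side : String) : String :=
  let lis_num : List Int := [10, 11, 12, 13, 14, 15]
  let lis_str : List String := ["A", "B", "C", "D", "E", "F"]
  if side = "in" then
    if PySem.Int.mod ((PySem.Int.ofStr? num).getD 0) 16 ∈ lis_num then
      let und := (PySem.List.index? lis_num (PySem.Int.mod ((PySem.Int.ofStr? num).getD 0) 16)).getD 0
      lis_str.getD und ""
    else PySem.Int.toStr (PySem.Int.mod ((PySem.Int.ofStr? num).getD 0) 16)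
  else
    if num ∈ lis_str then
      let und := (PySem.List.index? lis_str num).getD 0
      PySem.Int.toStr (lis_num.getD und 0)
    else num

-- int(...) is PySem.Int.ofStr?; .getD 0 stands for the ValueError case, excluded by Pre_.
def from_all_others (system : String) (num : String) : Int :=
  if system = "2" ∨ system = "8" then
    let numl := (num.toList.map (fun c => String.mk [c])).reverse
    (PySem.List.enumerate numl).foldl
      (fun number p =>
        number + ((PySem.Int.ofStr? p.2).getD 0) * ((PySem.Int.ofStr? system).getD 0) ^ p.1.toNat) 0
  else if system = "16" then
    let numl := (num.toList.map (fun c => String.mk [c])).reverse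
    (PySem.List.enumerate numl).foldl
      (fun number p =>
        number + ((PySem.Int.ofStr? (verification p.2 "from")).getD 0) * (16 : Int) ^ p.1.toNat) 0
  else 0

-- ===== PORT B =====
def hexMap : PySem.Dict String Int :=
  PySem.Dict.ofList [("A", 10), ("B", 11), ("C", 12), ("D", 13), ("E", 14), ("F", 15)]

def from_all_others_alt (system : String) (num : String) : Int :=
  if system = "2" ∨ system = "8" then
    num.toList.foldl
      (fun number c =>
        number * ((PySem.Int.ofStr? system).getD 0) + ((PySem.Int.ofStr? (String.mk [c])).getD 0)) 0
  else if system = "16" then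
    num.toList.foldl
      (fun number c =>
        number * 16 +
          ((PySem.Dict.get? hexMap (String.mk [c])).getD
            ((PySem.Int.ofStr? (String.mk [c])).getD 0))) 0
  else 0

-- ===== PRECONDITION & SPEC =====
-- Pre_ excludes exactly the inputs where Python A raises ValueError in int(...): a non-digit
-- character under base 2/8, or a character that is neither a digit nor an uppercase A-F under base 16.
def Pre_from_all_others (system : String) (num : String) : Prop :=
  ((system = "2" ∨ system = "8") → num.toList.all Char.isDigit = true) ∧
  (system = "16" → num.toList.all (fun c => c.isDigit || c ∈ ['A', 'B', 'C', 'D', 'E', 'F']) = true)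
instance (system : String) (num : String) : Decidable (Pre_from_all_others system num) := by
  unfold Pre_from_all_others; infer_instance

def pvWitness_from_all_others : String × String := ("16", "1A")

def Spec_from_all_others (system : String) (num : String) (out : Int) : Prop := out = from_all_others_alt system num
instance (system : String) (num : String) (out : Int) : Decidable (Spec_from_all_others system num out) := by unfold Spec_from_all_others; infer_instance

-- ===== CLAIM (what is proved, stated in full; the proofs are below) =====
def Claim_equal_from_all_others : Prop := ∀ (system : String) (num : String), Dom_from_all_others system num → Pre_from_all_others system num → Spec_from_all_others system num (from_all_others system num)

-- ===== LEMMAS AND PROOFS =====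

-- Horner with arbitrary start value.
theorem horner_shift {α : Type} (f : α → Int) (b : Int) :
    ∀ (l : List α) (s : Int),
      l.foldl (fun a c => a * b + f c) s = s * b ^ l.length + l.foldl (fun a c => a * b + f c) 0 := by
  intro l
  induction l with
  | nil => intro s; simp
  | cons c t ih =>
      intro s
      simp only [List.foldl_cons, List.length_cons]
      rw [ih (s * b + f c), ih (0 * b + f c)]
      ring

-- A's reversed positional sum equals B's forward Horner fold.
theorem revsum_eq_horner {α : Type} (f : α → Int) (b : Int) :
    ∀ (l : List α),
      (PySem.List.enumerate l.reverse).foldl (fun a p => a + f p.2 * b ^ p.1.toNat) 0 =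
        l.foldl (fun a c => a * b + f c) 0 := by
  intro l
  induction l with
  | nil => simp
  | cons c t ih =>
      simp only [List.reverse_cons, List.foldl_cons]
      rw [PySem.List.enumerate_append, List.foldl_append, ih]
      simp only [List.length_reverse, PySem.List.enumerate, List.foldl_cons, List.foldl_nil]
      rw [horner_shift f b t (0 * b + f c)]
      simp
      ring

-- A's per-character hex resolution equals B's dict-lookup-with-int-fallback.
theorem hexval_eq (s : String) :
    (PySem.Int.ofStr? (verification s "from")).getD 0 =
      (PySem.Dict.get? hexMap s).getD ((PySem.Int.ofStr? s).getD 0) := by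
  by_cases h1 : s = "A"; · subst h1; decide
  by_cases h2 : s = "B"; · subst h2; decide
  by_cases h3 : s = "C"; · subst h3; decide
  by_cases h4 : s = "D"; · subst h4; decide
  by_cases h5 : s = "E"; · subst h5; decide
  by_cases h6 : s = "F"; · subst h6; decide
  have hv : verification s "from" = s := by
    simp [verification, h1, h2, h3, h4, h5, h6]
  have hmk : hexMap = PySem.Dict.mk [("A", 10), ("B", 11), ("C", 12), ("D", 13), ("E", 14), ("F", 15)] := by decide
  have hd : PySem.Dict.get? hexMap s = none := by
    rw [hmk]
    simp only [PySem.Dict.get?_mk_cons, beq_iff_eq]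
    simp [Ne.symm h1, Ne.symm h2, Ne.symm h3, Ne.symm h4, Ne.symm h5, Ne.symm h6, PySem.Dict.get?]
  rw [hv, hd]; rfl

-- ===== VERDICT (by name: the statement is the Claim_ definition above) =====
theorem from_all_others_spec : Claim_equal_from_all_others := by
  intro system num _ _
  unfold Spec_from_all_others from_all_others from_all_others_alt
  by_cases h28 : system = "2" ∨ system = "8"
  · simp only [h28, if_pos]
    rw [revsum_eq_horner (fun s => (PySem.Int.ofStr? s).getD 0)
          ((PySem.Int.ofStr? system).getD 0) (num.toList.map (fun c => String.mk [c])),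
        List.foldl_map]
  · by_cases h16 : system = "16"
    · subst h16
      have hno : ¬("16" = "2" ∨ "16" = "8") := by decide
      rw [if_neg hno, if_neg hno, if_pos rfl, if_pos rfl]
      rw [revsum_eq_horner (fun s => (PySem.Int.ofStr? (verification s "from")).getD 0)
            (16 : Int) (num.toList.map (fun c => String.mk [c])),
          List.foldl_map]
      simp only [hexval_eq]
    · simp [h28, h16]
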